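-- pv_equiv track=rewrite | github.com/math-dev-24/aoc-algo-ts-rust-py | srcp/day-21.py | get_arrow_dir_int
-- ===== SOURCE A (Python) =====
-- from typing import Optional
--
-- def find_position(target: str, keyboard: list[list[str]]) -> Optional[dict]:
--     for ri, row in enumerate(keyboard):
--         for ci, val in enumerate(row):
--             if val == target:
--                 return {
--                     "position": (ri, ci),
--                     "value": val
--                 }
--     return None
--
-- def get_arrow_dir_int(initial_position: tuple[int, int], target: str, pad: list[list[str]]) -> list[str]:
--     x, y = initial_position
--     x_target, y_target = find_position(target, pad)["position"]
--     result = []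
--
--     while x != x_target or y != y_target:
--         if x_target < x:
--             result.append("^")
--             x -= 1
--         if x_target > x:
--             result.append("v")
--             x += 1
--         if y_target < y:
--             result.append("<")
--             y -= 1
--         if y_target > y:
--             result.append(">")
--             y += 1
--     result.append("A")
--     return result
-- ===== SOURCE B (Python) =====
-- def _locate(target, pad):
--     for ri, row in enumerate(pad):
--         if target in row:
--             return (ri, row.index(target))
--     return None
--
--
-- def get_arrow_dir_int(initial_position, target, pad):
--     x, y = initial_position
--     xt, yt = _locate(target, pad)
--     dx, dy = xt - x, yt - y
--     v = "^" if dx < 0 else "v"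
--     h = "<" if dy < 0 else ">"
--     adx, ady = abs(dx), abs(dy)
--     k = min(adx, ady)
--     return [v, h] * k + [v] * (adx - k) + [h] * (ady - k) + ["A"]
-- ===== Notes on version B (the rewrite author's own statement) =====
-- stated objective: simpler
-- what changed: Replaces the stateful coordinate-walk while loop with a closed-form construction — signed deltas, then k=min(|dx|,|dy|) interleaved pairs followed by the leftover run, built by list repetition — and replaces the nested index scan with per-row membership plus list.index.
import Mathlib
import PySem

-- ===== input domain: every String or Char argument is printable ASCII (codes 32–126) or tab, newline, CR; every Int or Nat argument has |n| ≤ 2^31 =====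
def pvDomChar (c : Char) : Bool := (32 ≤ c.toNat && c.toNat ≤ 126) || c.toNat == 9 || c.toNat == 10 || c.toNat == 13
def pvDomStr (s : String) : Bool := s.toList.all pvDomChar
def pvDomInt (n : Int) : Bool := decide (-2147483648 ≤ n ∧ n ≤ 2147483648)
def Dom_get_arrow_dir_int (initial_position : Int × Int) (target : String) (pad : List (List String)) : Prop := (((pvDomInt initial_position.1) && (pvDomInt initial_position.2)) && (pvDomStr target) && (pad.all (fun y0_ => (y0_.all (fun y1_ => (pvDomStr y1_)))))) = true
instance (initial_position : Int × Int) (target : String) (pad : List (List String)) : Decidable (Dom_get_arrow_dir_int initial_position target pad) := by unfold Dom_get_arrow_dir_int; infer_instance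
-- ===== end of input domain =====

-- B replaces A's stateful coordinate-walk while loop by signed deltas plus a count-driven
-- interleave of the two homogeneous arrow runs (objective: simpler); same return value on Pre_.

-- ===== PORT A =====
-- inner loop of find_position over one row (ci is the running column index)
def fpRow (target : String) (ri ci : Int) (row : List String) : Option ((Int × Int) × String) :=
  match row with
  | [] => none
  | v :: rest => if v == target then some ((ri, ci), v) else fpRow target ri (ci + 1) rest

-- outer loop of find_position; returns ((ri, ci), value) like A's dict
def fpRows (target : String) (ri : Int) (rows : List (List String)) : Option ((Int × Int) × String) :=
  match rows with
  | [] => none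
  | r :: rest =>
    match fpRow target ri 0 r with
    | some res => some res
    | none => fpRows target (ri + 1) rest

-- A's while loop: the four sequential ifs, threaded state (result, x, y).
-- fuel is only a structural-recursion guard: each iteration shrinks
-- |xt-x|+|yt-y| by ≥ 1, so fuel = |xt-x|+|yt-y| at the call site is never exhausted.
def loopA (fuel : Nat) (xt yt x y : Int) (result : List String) : List String :=
  if x ≠ xt ∨ y ≠ yt then
    match fuel with
    | 0 => result ++ ["A"]   -- unreachable with the fuel supplied below
    | f + 1 =>
      let r1 : List String := if xt < x then result ++ ["^"] else result
      let x1 : Int := if xt < x then x - 1 else x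
      let r2 : List String := if xt > x1 then r1 ++ ["v"] else r1
      let x2 : Int := if xt > x1 then x1 + 1 else x1
      let r3 : List String := if yt < y then r2 ++ ["<"] else r2
      let y1 : Int := if yt < y then y - 1 else y
      let r4 : List String := if yt > y1 then r3 ++ [">"] else r3
      let y2 : Int := if yt > y1 then y1 + 1 else y1
      loopA f xt yt x2 y2 r4
  else result ++ ["A"]

def get_arrow_dir_int (initial_position : Int × Int) (target : String) (pad : List (List String)) : List String :=
  match fpRows target 0 pad with
  | some res =>
    loopA ((res.1.1 - initial_position.1).natAbs + (res.1.2 - initial_position.2).natAbs)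
      res.1.1 res.1.2 initial_position.1 initial_position.2 []
  | none => []   -- Python raises TypeError here (None["position"]); excluded by Pre_

-- ===== PORT B =====
-- _locate: first row containing target, plus row.index(target)
def locateB (target : String) (ri : Int) (pad : List (List String)) : Option (Int × Int) :=
  match pad with
  | [] => none
  | row :: rest =>
    if row.contains target then
      -- row.index(target); the membership test guarantees index? is some here
      some (ri, ((PySem.List.index? row target).getD 0 : Nat))
    else locateB target (ri + 1) rest

def get_arrow_dir_int_alt (initial_position : Int × Int) (target : String) (pad : List (List String)) : List String :=
  match locateB target 0 pad with
  | some p =>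
    let dx := p.1 - initial_position.1
    let dy := p.2 - initial_position.2
    let v := if dx < 0 then "^" else "v"
    let h := if dy < 0 then "<" else ">"
    let adx : Int := dx.natAbs     -- abs(dx)
    let ady : Int := dy.natAbs     -- abs(dy)
    let k := min adx ady
    PySem.List.pyRepeat [v, h] k ++ PySem.List.pyRepeat [v] (adx - k)
      ++ PySem.List.pyRepeat [h] (ady - k) ++ ["A"]
  | none => []   -- Python raises TypeError here (unpacking None); excluded by Pre_

-- ===== PRECONDITION & SPEC =====
-- Pre_ excludes exactly the inputs whose target occurs nowhere in the pad: there
-- find_position returns None and A raises TypeError (B raises likewise).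
def Pre_get_arrow_dir_int (initial_position : Int × Int) (target : String) (pad : List (List String)) : Prop :=
  ∃ row ∈ pad, target ∈ row
instance (initial_position : Int × Int) (target : String) (pad : List (List String)) : Decidable (Pre_get_arrow_dir_int initial_position target pad) := by unfold Pre_get_arrow_dir_int; infer_instance

def pvWitness_get_arrow_dir_int : (Int × Int) × String × List (List String) :=
  ((0, 0), "A", [["7", "8"], ["A", "0"]])

def Spec_get_arrow_dir_int (initial_position : Int × Int) (target : String) (pad : List (List String)) (out : List String) : Prop := out = get_arrow_dir_int_alt initial_position target pad
instance (initial_position : Int × Int) (target : String) (pad : List (List String)) (out : List String) : Decidable (Spec_get_arrow_dir_int initial_position target pad out) := by unfold Spec_get_arrow_dir_int; infer_instance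

-- ===== CLAIM (what is proved, stated in full; the proofs are below) =====
def Claim_equal_get_arrow_dir_int : Prop := ∀ (initial_position : Int × Int) (target : String) (pad : List (List String)), Dom_get_arrow_dir_int initial_position target pad → Pre_get_arrow_dir_int initial_position target pad → Spec_get_arrow_dir_int initial_position target pad (get_arrow_dir_int initial_position target pad)

-- ===== LEMMAS AND PROOFS =====

-- proof-side helper: the interleaving of the two arrow runs, round by round
def interleaveB : Nat → Nat → String → String → List String
  | 0, 0, _, _ => []
  | 0, b + 1, v, h => [h] ++ interleaveB 0 b v h
  | a + 1, 0, v, h => [v] ++ interleaveB a 0 v h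
  | a + 1, b + 1, v, h => [v, h] ++ interleaveB a b v h

lemma interleave_left (v h : String) : ∀ b, interleaveB 0 b v h = List.replicate b h := by
  intro b
  induction b with
  | zero => simp [interleaveB]
  | succ n ih => simp [interleaveB, ih, List.replicate_succ]

lemma interleave_right (v h : String) : ∀ a, interleaveB a 0 v h = List.replicate a v := by
  intro a
  induction a with
  | zero => simp [interleaveB]
  | succ n ih => simp [interleaveB, ih, List.replicate_succ]

-- B's closed form equals the interleaving
lemma interleave_closed : ∀ (a b : Nat) (v h : String),
    (List.replicate (min a b) [v, h]).flatten ++ List.replicate (a - min a b) v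
        ++ List.replicate (b - min a b) h
      = interleaveB a b v h := by
  intro a
  induction a with
  | zero =>
    intro b v h
    simp [interleave_left]
  | succ n ih =>
    intro b v h
    cases b with
    | zero => simp [interleave_right]
    | succ m =>
      have hmin : min (n + 1) (m + 1) = min n m + 1 := by omega
      rw [hmin, List.replicate_succ, List.flatten_cons,
          show n + 1 - (min n m + 1) = n - min n m by omega,
          show m + 1 - (min n m + 1) = m - min n m by omega]
      simp only [interleaveB, List.append_assoc, List.cons_append, List.nil_append]
      rw [← List.append_assoc, ih m v h]

lemma fpRow_eq (target : String) (ri : Int) :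
    ∀ (row : List String) (ci : Int),
      fpRow target ri ci row
        = (PySem.List.index? row target).map (fun (k : Nat) => ((ri, ci + (k : Int)), target)) := by
  intro row
  induction row with
  | nil => intro ci; simp [fpRow, PySem.List.index?]
  | cons v rest ih =>
    intro ci
    rw [fpRow]
    by_cases hv : (v == target) = true
    · have hvt : v = target := by simpa using hv
      subst hvt
      rw [if_pos hv, PySem.List.index?_cons_self]
      simp
    · have hne : v ≠ target := by simpa using hv
      rw [if_neg hv, PySem.List.index?_cons_of_ne rest hne, ih (ci + 1), Option.map_map]
      cases PySem.List.index? rest target with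
      | none => rfl
      | some k =>
        simp only [Option.map_some, Function.comp_apply]
        simp [Prod.ext_iff]
        omega

lemma rows_eq (target : String) :
    ∀ (rows : List (List String)) (ri : Int),
      (fpRows target ri rows).map (·.1) = locateB target ri rows := by
  intro rows
  induction rows with
  | nil => intro ri; rfl
  | cons row rest ih =>
    intro ri
    rw [fpRows, locateB, fpRow_eq]
    by_cases hc : target ∈ row
    · obtain ⟨k, hk⟩ := Option.isSome_iff_exists.mp ((PySem.List.index?_isSome_iff row target).mpr hc)
      rw [hk, if_pos (by simpa using hc)]
      simp
    · rw [(PySem.List.index?_eq_none_iff row target).mpr hc]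
      simp [hc, ih]

-- chars matter only while their counts are nonzero
lemma interleave_congr :
    ∀ adx ady (v v' h h' : String), (adx ≠ 0 → v = v') → (ady ≠ 0 → h = h') →
      interleaveB adx ady v h = interleaveB adx ady v' h' := by
  intro adx
  induction adx with
  | zero =>
    intro ady
    induction ady with
    | zero => intro v v' h h' _ _; simp [interleaveB]
    | succ b ihb =>
      intro v v' h h' hv hh
      rw [hh (Nat.succ_ne_zero b)]
      simp only [interleaveB]
      rw [ihb v v' h' h' (fun h0 => absurd rfl h0) (fun _ => rfl)]
  | succ a iha =>
    intro ady v v' h h' hv hh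
    rw [hv (Nat.succ_ne_zero a)]
    cases ady with
    | zero =>
      simp only [interleaveB]
      rw [iha 0 v' v' h h' (fun _ => rfl) (fun h0 => absurd rfl h0)]
    | succ b =>
      rw [hh (Nat.succ_ne_zero b)]

-- the emitted arrows of either program as a function of the signed deltas
def stepsAB (dx dy : Int) : List String :=
  interleaveB dx.natAbs dy.natAbs (if dx < 0 then "^" else "v") (if dy < 0 then "<" else ">")

lemma steps_nn (dx dy : Int) (hx : dx < 0) (hy : dy < 0) :
    stepsAB dx dy = ["^", "<"] ++ stepsAB (dx + 1) (dy + 1) := by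
  unfold stepsAB
  obtain ⟨a, ha⟩ : ∃ a, dx.natAbs = a + 1 := ⟨dx.natAbs - 1, by omega⟩
  obtain ⟨b, hb⟩ : ∃ b, dy.natAbs = b + 1 := ⟨dy.natAbs - 1, by omega⟩
  have hA : (dx + 1).natAbs = a := by omega
  have hB : (dy + 1).natAbs = b := by omega
  rw [if_pos hx, if_pos hy, ha, hb, hA, hB]
  simp only [interleaveB, List.cons_append, List.nil_append]
  refine congrArg (List.cons "^") (congrArg (List.cons "<") (interleave_congr a b _ _ _ _ ?_ ?_))
  · intro hne
    rw [if_pos (show dx + 1 < 0 by omega)]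
  · intro hne
    rw [if_pos (show dy + 1 < 0 by omega)]

lemma steps_np (dx dy : Int) (hx : dx < 0) (hy : 0 < dy) :
    stepsAB dx dy = ["^", ">"] ++ stepsAB (dx + 1) (dy - 1) := by
  unfold stepsAB
  obtain ⟨a, ha⟩ : ∃ a, dx.natAbs = a + 1 := ⟨dx.natAbs - 1, by omega⟩
  obtain ⟨b, hb⟩ : ∃ b, dy.natAbs = b + 1 := ⟨dy.natAbs - 1, by omega⟩
  have hA : (dx + 1).natAbs = a := by omega
  have hB : (dy - 1).natAbs = b := by omega
  rw [if_pos hx, if_neg (show ¬ dy < 0 by omega), ha, hb, hA, hB]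
  simp only [interleaveB, List.cons_append, List.nil_append]
  refine congrArg (List.cons "^") (congrArg (List.cons ">") (interleave_congr a b _ _ _ _ ?_ ?_))
  · intro hne
    rw [if_pos (show dx + 1 < 0 by omega)]
  · intro hne
    rw [if_neg (show ¬ dy - 1 < 0 by omega)]

lemma steps_pn (dx dy : Int) (hx : 0 < dx) (hy : dy < 0) :
    stepsAB dx dy = ["v", "<"] ++ stepsAB (dx - 1) (dy + 1) := by
  unfold stepsAB
  obtain ⟨a, ha⟩ : ∃ a, dx.natAbs = a + 1 := ⟨dx.natAbs - 1, by omega⟩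
  obtain ⟨b, hb⟩ : ∃ b, dy.natAbs = b + 1 := ⟨dy.natAbs - 1, by omega⟩
  have hA : (dx - 1).natAbs = a := by omega
  have hB : (dy + 1).natAbs = b := by omega
  rw [if_neg (show ¬ dx < 0 by omega), if_pos hy, ha, hb, hA, hB]
  simp only [interleaveB, List.cons_append, List.nil_append]
  refine congrArg (List.cons "v") (congrArg (List.cons "<") (interleave_congr a b _ _ _ _ ?_ ?_))
  · intro hne
    rw [if_neg (show ¬ dx - 1 < 0 by omega)]
  · intro hne
    rw [if_pos (show dy + 1 < 0 by omega)]

lemma steps_pp (dx dy : Int) (hx : 0 < dx) (hy : 0 < dy) :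
    stepsAB dx dy = ["v", ">"] ++ stepsAB (dx - 1) (dy - 1) := by
  unfold stepsAB
  obtain ⟨a, ha⟩ : ∃ a, dx.natAbs = a + 1 := ⟨dx.natAbs - 1, by omega⟩
  obtain ⟨b, hb⟩ : ∃ b, dy.natAbs = b + 1 := ⟨dy.natAbs - 1, by omega⟩
  have hA : (dx - 1).natAbs = a := by omega
  have hB : (dy - 1).natAbs = b := by omega
  rw [if_neg (show ¬ dx < 0 by omega), if_neg (show ¬ dy < 0 by omega), ha, hb, hA, hB]
  simp only [interleaveB, List.cons_append, List.nil_append]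
  refine congrArg (List.cons "v") (congrArg (List.cons ">") (interleave_congr a b _ _ _ _ ?_ ?_))
  · intro hne
    rw [if_neg (show ¬ dx - 1 < 0 by omega)]
  · intro hne
    rw [if_neg (show ¬ dy - 1 < 0 by omega)]

lemma steps_nz (dx dy : Int) (hx : dx < 0) (hy : dy = 0) :
    stepsAB dx dy = ["^"] ++ stepsAB (dx + 1) dy := by
  subst hy
  unfold stepsAB
  obtain ⟨a, ha⟩ : ∃ a, dx.natAbs = a + 1 := ⟨dx.natAbs - 1, by omega⟩
  have hA : (dx + 1).natAbs = a := by omega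
  rw [if_pos hx, ha, hA, show (0 : Int).natAbs = 0 from rfl]
  simp only [interleaveB, List.cons_append, List.nil_append]
  refine congrArg (List.cons "^") (interleave_congr a 0 _ _ _ _ ?_ (fun h0 => absurd rfl h0))
  intro hne
  rw [if_pos (show dx + 1 < 0 by omega)]

lemma steps_pz (dx dy : Int) (hx : 0 < dx) (hy : dy = 0) :
    stepsAB dx dy = ["v"] ++ stepsAB (dx - 1) dy := by
  subst hy
  unfold stepsAB
  obtain ⟨a, ha⟩ : ∃ a, dx.natAbs = a + 1 := ⟨dx.natAbs - 1, by omega⟩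
  have hA : (dx - 1).natAbs = a := by omega
  rw [if_neg (show ¬ dx < 0 by omega), ha, hA, show (0 : Int).natAbs = 0 from rfl]
  simp only [interleaveB, List.cons_append, List.nil_append]
  refine congrArg (List.cons "v") (interleave_congr a 0 _ _ _ _ ?_ (fun h0 => absurd rfl h0))
  intro hne
  rw [if_neg (show ¬ dx - 1 < 0 by omega)]

lemma steps_zn (dx dy : Int) (hx : dx = 0) (hy : dy < 0) :
    stepsAB dx dy = ["<"] ++ stepsAB dx (dy + 1) := by
  subst hx
  unfold stepsAB
  obtain ⟨b, hb⟩ : ∃ b, dy.natAbs = b + 1 := ⟨dy.natAbs - 1, by omega⟩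
  have hB : (dy + 1).natAbs = b := by omega
  rw [if_pos hy, hb, hB, show (0 : Int).natAbs = 0 from rfl]
  simp only [interleaveB, List.cons_append, List.nil_append]
  refine congrArg (List.cons "<") (interleave_congr 0 b _ _ _ _ (fun h0 => absurd rfl h0) ?_)
  intro hne
  rw [if_pos (show dy + 1 < 0 by omega)]

lemma steps_zp (dx dy : Int) (hx : dx = 0) (hy : 0 < dy) :
    stepsAB dx dy = [">"] ++ stepsAB dx (dy - 1) := by
  subst hx
  unfold stepsAB
  obtain ⟨b, hb⟩ : ∃ b, dy.natAbs = b + 1 := ⟨dy.natAbs - 1, by omega⟩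
  have hB : (dy - 1).natAbs = b := by omega
  rw [if_neg (show ¬ dy < 0 by omega), hb, hB, show (0 : Int).natAbs = 0 from rfl]
  simp only [interleaveB, List.cons_append, List.nil_append]
  refine congrArg (List.cons ">") (interleave_congr 0 b _ _ _ _ (fun h0 => absurd rfl h0) ?_)
  intro hne
  rw [if_neg (show ¬ dy - 1 < 0 by omega)]

lemma loop_eq (xt yt : Int) :
    ∀ n fuel x y acc, (xt - x).natAbs + (yt - y).natAbs = n → n ≤ fuel →
      loopA fuel xt yt x y acc = acc ++ (stepsAB (xt - x) (yt - y) ++ ["A"]) := by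
  intro n
  induction n using Nat.strong_induction_on with
  | _ n IH =>
    intro fuel x y acc hn hf
    rw [loopA.eq_def]
    by_cases h : x ≠ xt ∨ y ≠ yt
    · rw [if_pos h]
      have hn1 : 1 ≤ n := by rcases h with h | h <;> omega
      cases fuel with
      | zero => omega
      | succ f =>
        rcases lt_trichotomy xt x with hx | hx | hx
        · rcases lt_trichotomy yt y with hy | hy | hy
          · have hrec := fun acc' => IH ((xt - (x - 1)).natAbs + (yt - (y - 1)).natAbs) (by omega) f (x - 1) (y - 1) acc' rfl (by omega)
            rw [steps_nn (xt - x) (yt - y) (by omega) (by omega)]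
            rw [show xt - x + 1 = xt - (x - 1) by ring, show yt - y + 1 = yt - (y - 1) by ring]
            simp [hx, show ¬ x - 1 < xt by omega, hy, show ¬ y - 1 < yt by omega, hrec, List.append_assoc]
          · have hrec := fun acc' => IH ((xt - (x - 1)).natAbs + (yt - y).natAbs) (by omega) f (x - 1) y acc' rfl (by omega)
            rw [steps_nz (xt - x) (yt - y) (by omega) (by omega)]
            rw [show xt - x + 1 = xt - (x - 1) by ring]
            simp [hx, show ¬ x - 1 < xt by omega, show ¬ yt < y by omega, show ¬ y < yt by omega, hrec, List.append_assoc]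
          · have hrec := fun acc' => IH ((xt - (x - 1)).natAbs + (yt - (y + 1)).natAbs) (by omega) f (x - 1) (y + 1) acc' rfl (by omega)
            rw [steps_np (xt - x) (yt - y) (by omega) (by omega)]
            rw [show xt - x + 1 = xt - (x - 1) by ring, show yt - y - 1 = yt - (y + 1) by ring]
            simp [hx, show ¬ x - 1 < xt by omega, show ¬ yt < y by omega, show y < yt by omega, hrec, List.append_assoc]
        · rcases lt_trichotomy yt y with hy | hy | hy
          · have hrec := fun acc' => IH ((xt - x).natAbs + (yt - (y - 1)).natAbs) (by omega) f x (y - 1) acc' rfl (by omega)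
            rw [steps_zn (xt - x) (yt - y) (by omega) (by omega)]
            rw [show yt - y + 1 = yt - (y - 1) by ring]
            simp [show ¬ xt < x by omega, show ¬ x < xt by omega, hy, show ¬ y - 1 < yt by omega, hrec, List.append_assoc]
          · rcases h with h | h <;> omega
          · have hrec := fun acc' => IH ((xt - x).natAbs + (yt - (y + 1)).natAbs) (by omega) f x (y + 1) acc' rfl (by omega)
            rw [steps_zp (xt - x) (yt - y) (by omega) (by omega)]
            rw [show yt - y - 1 = yt - (y + 1) by ring]
            simp [show ¬ xt < x by omega, show ¬ x < xt by omega, show ¬ yt < y by omega, show y < yt by omega, hrec, List.append_assoc]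
        · rcases lt_trichotomy yt y with hy | hy | hy
          · have hrec := fun acc' => IH ((xt - (x + 1)).natAbs + (yt - (y - 1)).natAbs) (by omega) f (x + 1) (y - 1) acc' rfl (by omega)
            rw [steps_pn (xt - x) (yt - y) (by omega) (by omega)]
            rw [show xt - x - 1 = xt - (x + 1) by ring, show yt - y + 1 = yt - (y - 1) by ring]
            simp [show ¬ xt < x by omega, show x < xt by omega, hy, show ¬ y - 1 < yt by omega, hrec, List.append_assoc]
          · have hrec := fun acc' => IH ((xt - (x + 1)).natAbs + (yt - y).natAbs) (by omega) f (x + 1) y acc' rfl (by omega)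
            rw [steps_pz (xt - x) (yt - y) (by omega) (by omega)]
            rw [show xt - x - 1 = xt - (x + 1) by ring]
            simp [show ¬ xt < x by omega, show x < xt by omega, show ¬ yt < y by omega, show ¬ y < yt by omega, hrec, List.append_assoc]
          · have hrec := fun acc' => IH ((xt - (x + 1)).natAbs + (yt - (y + 1)).natAbs) (by omega) f (x + 1) (y + 1) acc' rfl (by omega)
            rw [steps_pp (xt - x) (yt - y) (by omega) (by omega)]
            rw [show xt - x - 1 = xt - (x + 1) by ring, show yt - y - 1 = yt - (y + 1) by ring]
            simp [show ¬ xt < x by omega, show x < xt by omega, show ¬ yt < y by omega, show y < yt by omega, hrec, List.append_assoc]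
    · rw [if_neg h]
      push_neg at h
      rw [stepsAB, h.1, h.2]
      simp [interleaveB]

-- ===== VERDICT (by name: the statement is the Claim_ definition above) =====
theorem get_arrow_dir_int_spec : Claim_equal_get_arrow_dir_int := by
  intro ip target pad _ hpre
  unfold Spec_get_arrow_dir_int get_arrow_dir_int get_arrow_dir_int_alt
  rw [← rows_eq]
  cases hfp : fpRows target 0 pad with
  | none => rfl
  | some res =>
    simp only [Option.map_some]
    rw [loop_eq res.1.1 res.1.2 _ _ ip.1 ip.2 [] rfl (Nat.le_refl _)]
    have h1 : (min ((res.1.1 - ip.1).natAbs : Int) ((res.1.2 - ip.2).natAbs : Int)).toNat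
        = min (res.1.1 - ip.1).natAbs (res.1.2 - ip.2).natAbs := by omega
    have h2 : (((res.1.1 - ip.1).natAbs : Int) - min ((res.1.1 - ip.1).natAbs : Int) ((res.1.2 - ip.2).natAbs : Int)).toNat
        = (res.1.1 - ip.1).natAbs - min (res.1.1 - ip.1).natAbs (res.1.2 - ip.2).natAbs := by omega
    have h3 : (((res.1.2 - ip.2).natAbs : Int) - min ((res.1.1 - ip.1).natAbs : Int) ((res.1.2 - ip.2).natAbs : Int)).toNat
        = (res.1.2 - ip.2).natAbs - min (res.1.1 - ip.1).natAbs (res.1.2 - ip.2).natAbs := by omega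
    rw [PySem.List.pyRepeat_singleton, PySem.List.pyRepeat_singleton]
    simp only [PySem.List.pyRepeat, h1, h2, h3]
    simp [stepsAB, ← interleave_closed, List.append_assoc]
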